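-- pv_equiv track=rewrite | github.com/Egalitarian21/SEO-Internal-Links-Automation-Tool | Product/Internal-linking-tool v1/Codes/Backend/app/infra/llm_client.py | summarize_keywords
-- ===== SOURCE A (Python) =====
-- def summarize_keywords(text: str) -> list[str]:
--     words = [part.strip(".,") for part in text.lower().split()]
--     unique_words = []
--     for word in words:
--         if len(word) > 5 and word not in unique_words:
--             unique_words.append(word)
--         if len(unique_words) == 3:
--             break
--     return unique_words or ["internal linking", "seo", "content"]
-- ===== SOURCE B (Python) =====
-- def summarize_keywords(text: str) -> list[str]:
--     def pick(ws, k):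
--         # Select the next first long word, then recurse on the tail with
--         # all its later duplicates filtered out; no seen-set is kept.
--         if k == 0 or not ws:
--             return []
--         w, rest = ws[0], ws[1:]
--         if len(w) > 5:
--             return [w] + pick([x for x in rest if x != w], k - 1)
--         return pick(rest, k)
--
--     kws = pick([part.strip(".,") for part in text.lower().split()], 3)
--     return kws or ["internal linking", "seo", "content"]
-- ===== Notes on version B (the rewrite author's own statement) =====
-- stated objective: alternative
-- what changed: Replaced A's accumulator loop with an early break and a membership test against the growing result by a recursive selection: pick the next long word, filter all its later duplicates out of the remaining tail, recurse with a countdown of 3; no seen-collection exists.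
import Mathlib
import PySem

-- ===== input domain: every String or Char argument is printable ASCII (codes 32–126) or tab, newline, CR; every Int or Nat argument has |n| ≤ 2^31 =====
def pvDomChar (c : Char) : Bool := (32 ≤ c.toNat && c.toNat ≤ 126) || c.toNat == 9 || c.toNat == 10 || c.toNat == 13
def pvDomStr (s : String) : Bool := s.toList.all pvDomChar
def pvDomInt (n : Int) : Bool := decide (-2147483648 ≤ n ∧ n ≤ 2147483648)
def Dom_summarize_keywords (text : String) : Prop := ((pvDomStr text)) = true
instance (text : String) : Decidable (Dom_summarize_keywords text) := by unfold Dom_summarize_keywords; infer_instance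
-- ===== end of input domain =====

-- B replaces A's seen-list loop with a recursive selection that filters later duplicates out of the tail (objective: alternative).

-- ===== PORT A =====
-- A's for-loop with append-if-new and `break` at 3 collected words
def pvALoop : List String → List String → List String
  | [], acc => acc
  | w :: ws, acc =>
    let acc' := if PySem.Str.len w > 5 ∧ acc.contains w = false then acc ++ [w] else acc
    if acc'.length = 3 then acc' else pvALoop ws acc'

def summarize_keywords (text : String) : List String :=
  let words := (PySem.Str.split₀ (PySem.Str.lower text)).map (fun part => PySem.Str.stripChars part ".,")
  let unique_words := pvALoop words []
  if unique_words = [] then ["internal linking", "seo", "content"] else unique_words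

-- ===== PORT B =====
-- Source B's `pick`: take the next long word, drop its duplicates from the tail, count down
def pvPick : List String → Nat → List String
  | _, 0 => []
  | [], _ + 1 => []
  | w :: rest, k + 1 =>
    if PySem.Str.len w > 5 then
      w :: pvPick (rest.filter (fun x => x != w)) k
    else
      pvPick rest (k + 1)
termination_by ws _ => ws.length
decreasing_by
· simp only [List.length_unattach]
  exact Nat.lt_succ_of_le (le_trans (List.length_filter_le _ _) (by simp))
· exact Nat.lt_succ_self _

def summarize_keywords_alt (text : String) : List String :=
  let kws := pvPick ((PySem.Str.split₀ (PySem.Str.lower text)).map (fun part => PySem.Str.stripChars part ".,")) 3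
  if kws = [] then ["internal linking", "seo", "content"] else kws

-- ===== PRECONDITION & SPEC =====
def Spec_summarize_keywords (text : String) (out : List String) : Prop := out = summarize_keywords_alt text
instance (text : String) (out : List String) : Decidable (Spec_summarize_keywords text out) := by unfold Spec_summarize_keywords; infer_instance

-- ===== CLAIM (what is proved, stated in full; the proofs are below) =====
def Claim_equal_summarize_keywords : Prop := ∀ (text : String), Dom_summarize_keywords text → Spec_summarize_keywords text (summarize_keywords text)

-- ===== LEMMAS AND PROOFS =====

-- invariant: A's loop on words not yet seen equals acc ++ B's recursive pick of the remaining budget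
theorem pv_loop_pick (ws : List String) : ∀ (acc : List String), acc.length < 3 →
    pvALoop ws acc = acc ++ pvPick (ws.filter (fun x => !acc.contains x)) (3 - acc.length) := by
  induction ws with
  | nil =>
    intro acc h
    simp only [pvALoop, List.filter_nil]
    rw [(by omega : 3 - acc.length = (3 - acc.length - 1) + 1)]
    simp [pvPick]
  | cons w ws ih =>
    intro acc h
    have hff : ∀ hw : w ∉ acc,
        (ws.filter (fun x => !acc.contains x)).filter (fun x => x != w) =
          ws.filter (fun x => !(acc ++ [w]).contains x) := by
      intro hw
      rw [List.filter_filter]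
      apply List.filter_congr
      intro x _
      by_cases hxw : x = w <;> simp [hxw]
    simp only [pvALoop]
    split_ifs with h1 h2 h2
    · -- appended w, reached 3: budget was exactly 1
      obtain ⟨hl, hw⟩ := h1
      have hw' : w ∉ acc := by simpa using hw
      have hlen : acc.length = 2 := by simp at h2; omega
      rw [List.filter_cons, if_pos (by simp [hw'])]
      rw [(by omega : 3 - acc.length = 0 + 1)]
      have hl' : 5 < w.length := by simpa using hl
      simp [pvPick, hl']
    · -- appended w, still short: recurse with one fewer to pick
      obtain ⟨hl, hw⟩ := h1
      have hw' : w ∉ acc := by simpa using hw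
      have h3' : (acc ++ [w]).length < 3 := by simp at h2 ⊢; omega
      rw [List.filter_cons, if_pos (by simp [hw'])]
      rw [(by omega : 3 - acc.length = (2 - acc.length) + 1)]
      rw [ih (acc ++ [w]) h3']
      simp only [pvPick, if_pos hl]
      rw [hff hw', (by simp : 3 - (acc ++ [w]).length = 2 - acc.length)]
      simp
    · -- skipped word but acc already length 3: impossible
      omega
    · -- skipped word (short, or already collected)
      rw [ih acc h]
      by_cases hw : w ∈ acc
      · rw [List.filter_cons, if_neg (by simp [hw])]
      · have hl : ¬ PySem.Str.len w > 5 := by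
          intro hl; exact h1 ⟨hl, by simpa using hw⟩
        rw [List.filter_cons, if_pos (by simp [hw])]
        rw [(by omega : 3 - acc.length = (2 - acc.length) + 1)]
        simp only [pvPick, if_neg hl]

-- ===== VERDICT (by name: the statement is the Claim_ definition above) =====
theorem summarize_keywords_spec : Claim_equal_summarize_keywords := by
  intro text _
  unfold Spec_summarize_keywords
  simp only [summarize_keywords, summarize_keywords_alt]
  rw [pv_loop_pick _ [] (by simp)]
  simp
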